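-- pv_equiv track=rewrite | github.com/traceopt-ai/traceml | src/traceml/renderers/step_memory/compute.py | _common_suffix_steps_fast
-- ===== SOURCE A (Python) =====
-- from typing import Any, Dict, List, Optional, Tuple
--
-- def _common_suffix_steps_fast(
--     per_rank_steps: Dict[int, Dict[int, float]],
--     completed_step: int,
--     window_size: int,
-- ) -> List[int]:
--     """
--     Equivalent to:
--       intersect steps across ranks (<= completed_step),
--       then take sorted(common)[-window_size:].
--
--     Faster: walk backward from completed_step and collect the top-K common steps.
--
--     Stability guard:
--       - cap backward scan to avoid pathological sparse-step hangs
--         (still returns best-effort common suffix if found).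
--     """
--     maps = list(per_rank_steps.values())
--     if not maps or window_size <= 0 or completed_step < 0:
--         return []
--
--     ref = maps[0]
--     out_rev: List[int] = []
--
--     st = completed_step
--     scan_cap = max(window_size * 20, window_size + 1)  # conservative cap
--     scanned = 0
--
--     while st >= 0 and len(out_rev) < window_size:
--         scanned += 1
--         if scanned > scan_cap:
--             break
--
--         if st in ref:
--             ok = True
--             for m in maps[1:]:
--                 if st not in m:
--                     ok = False
--                     break
--             if ok:
--                 out_rev.append(st)
--
--         st -= 1
--
--     if not out_rev:
--         return []
--     out_rev.reverse()
--     return out_rev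
-- ===== SOURCE B (Python) =====
-- def _common_suffix_steps_fast(per_rank_steps, completed_step, window_size):
--     maps = list(per_rank_steps.values())
--     if not maps or window_size <= 0 or completed_step < 0:
--         return []
--     common = set(maps[0])
--     for m in maps[1:]:
--         common = common.intersection(m)
--     scan_cap = max(window_size * 20, window_size + 1)
--     lo = max(0, completed_step - scan_cap + 1)
--     candidates = sorted(s for s in common if lo <= s <= completed_step)
--     return candidates[-window_size:]
-- ===== Notes on version B (the rewrite author's own statement) =====
-- stated objective: simpler
-- what changed: Replaces the stateful backward while-scan (counters, early break, reverse at the end) with a declarative pass: intersect the ranks' key sets, keep the steps in the capped window [max(0, completed_step-scan_cap+1), completed_step], sort, and slice the last window_size.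
import Mathlib
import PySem

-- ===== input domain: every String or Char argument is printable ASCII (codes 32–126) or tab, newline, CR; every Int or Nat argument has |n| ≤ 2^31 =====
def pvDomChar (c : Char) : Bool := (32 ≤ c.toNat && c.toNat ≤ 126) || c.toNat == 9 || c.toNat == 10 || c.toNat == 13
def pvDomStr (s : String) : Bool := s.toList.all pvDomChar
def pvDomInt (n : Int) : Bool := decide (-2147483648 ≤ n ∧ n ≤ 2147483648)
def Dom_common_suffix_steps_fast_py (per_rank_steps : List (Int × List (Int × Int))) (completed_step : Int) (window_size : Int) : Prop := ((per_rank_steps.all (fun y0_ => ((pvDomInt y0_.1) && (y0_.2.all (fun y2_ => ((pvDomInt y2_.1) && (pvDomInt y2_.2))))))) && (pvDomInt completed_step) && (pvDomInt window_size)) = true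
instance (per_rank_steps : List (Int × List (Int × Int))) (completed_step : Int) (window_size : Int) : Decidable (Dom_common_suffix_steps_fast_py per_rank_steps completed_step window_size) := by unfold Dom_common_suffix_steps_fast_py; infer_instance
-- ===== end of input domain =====

-- B replaces A's stateful capped backward while-scan by set intersection + window filter + sort + tail slice (objective: simpler).

-- ===== PORT A =====
-- 'ok = True; for m in maps[1:]: if st not in m: ok = False; break'
def csfA_inner (ms : List (List (Int × Int))) (st : Int) : Bool :=
  match ms with
  | [] => true
  | m :: rest => if ¬ (m.any (fun p => p.1 == st)) then false else csfA_inner rest st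

-- the while loop; fuel = scan_cap - scanned (the 'scanned > scan_cap' break)
def csfA_loop (ref : List (Int × Int)) (rest : List (List (Int × Int))) (w : Int) :
    Nat → Int → List Int → List Int
  | 0, _, acc => acc
  | fuel+1, st, acc =>
    if 0 ≤ st ∧ (acc.length : Int) < w then
      csfA_loop ref rest w fuel (st - 1)
        (if ref.any (fun p => p.1 == st) then
          (if csfA_inner rest st then acc ++ [st] else acc)
         else acc)
    else acc

def common_suffix_steps_fast_py (per_rank_steps : List (Int × List (Int × Int))) (completed_step : Int) (window_size : Int) : List Int :=
  match per_rank_steps.map Prod.snd with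
  | [] => []
  | ref :: rest =>
    if window_size ≤ 0 ∨ completed_step < 0 then []
    else
      let scan_cap := max (window_size * 20) (window_size + 1)
      let out_rev := csfA_loop ref rest window_size scan_cap.toNat completed_step []
      if out_rev = [] then [] else out_rev.reverse

-- ===== PORT B =====
def common_suffix_steps_fast_py_alt (per_rank_steps : List (Int × List (Int × Int))) (completed_step : Int) (window_size : Int) : List Int :=
  match per_rank_steps.map Prod.snd with
  | [] => []
  | m0 :: rest =>
    if window_size ≤ 0 ∨ completed_step < 0 then []
    else
      let common := rest.foldl (fun c m => PySem.Set.inter c (m.map Prod.fst))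
                      (PySem.Set.ofList (m0.map Prod.fst))
      let scan_cap := max (window_size * 20) (window_size + 1)
      let lo := max 0 (completed_step - scan_cap + 1)
      let candidates := PySem.List.sorted
        (common.filter (fun s => decide (lo ≤ s) && decide (s ≤ completed_step)))
        (fun x => x) false
      PySem.List.slice candidates (some (-window_size)) none

-- ===== PRECONDITION & SPEC =====
def Spec_common_suffix_steps_fast_py (per_rank_steps : List (Int × List (Int × Int))) (completed_step : Int) (window_size : Int) (out : List Int) : Prop := out = common_suffix_steps_fast_py_alt per_rank_steps completed_step window_size
instance (per_rank_steps : List (Int × List (Int × Int))) (completed_step : Int) (window_size : Int) (out : List Int) : Decidable (Spec_common_suffix_steps_fast_py per_rank_steps completed_step window_size out) := by unfold Spec_common_suffix_steps_fast_py; infer_instance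

-- ===== CLAIM (what is proved, stated in full; the proofs are below) =====
def Claim_equal_common_suffix_steps_fast_py : Prop := ∀ (per_rank_steps : List (Int × List (Int × Int))) (completed_step : Int) (window_size : Int), Dom_common_suffix_steps_fast_py per_rank_steps completed_step window_size → Spec_common_suffix_steps_fast_py per_rank_steps completed_step window_size (common_suffix_steps_fast_py per_rank_steps completed_step window_size)

-- ===== LEMMAS AND PROOFS =====

-- the membership test A applies at each scanned step
def okA (ref : List (Int × Int)) (rest : List (List (Int × Int))) (st : Int) : Bool :=
  ref.any (fun p => p.1 == st) && csfA_inner rest st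

-- [st, st-1, …], n steps, stopping before going negative
def decRange (st : Int) : Nat → List Int
  | 0 => []
  | n+1 => if 0 ≤ st then st :: decRange (st - 1) n else []

theorem csfA_inner_eq_all (ms : List (List (Int × Int))) (st : Int) :
    csfA_inner ms st = ms.all (fun m => m.any (fun p => p.1 == st)) := by
  induction ms with
  | nil => rfl
  | cons m rest ih =>
    by_cases h : m.any (fun p => p.1 == st) = true <;>
      simp [csfA_inner, List.all_cons, ih, h]

theorem mem_decRange (x st : Int) (n : Nat) :
    x ∈ decRange st n ↔ 0 ≤ x ∧ st - n < x ∧ x ≤ st := by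
  induction n generalizing st with
  | zero => simp [decRange]
  | succ n ih =>
    by_cases h : 0 ≤ st
    · simp [decRange, h, ih]; omega
    · simp [decRange, h]; omega

theorem pairwise_gt_decRange (st : Int) (n : Nat) :
    (decRange st n).Pairwise (· > ·) := by
  induction n generalizing st with
  | zero => simp [decRange]
  | succ n ih =>
    by_cases h : 0 ≤ st
    · simp only [decRange, if_pos h]
      refine List.pairwise_cons.mpr ⟨?_, ih _⟩
      intro y hy
      have := (mem_decRange y (st-1) n).mp hy
      omega
    · simp [decRange, h]

theorem csfA_loop_stop (ref : List (Int × Int)) (rest : List (List (Int × Int))) (w : Int)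
    (fuel : Nat) (st : Int) (acc : List Int) (h : ¬ (acc.length : Int) < w) :
    csfA_loop ref rest w fuel st acc = acc := by
  cases fuel with
  | zero => rfl
  | succ n =>
    rw [csfA_loop, if_neg]
    rintro ⟨-, h2⟩
    exact h h2

theorem csfA_loop_eq (ref : List (Int × Int)) (rest : List (List (Int × Int))) (w : Int)
    (fuel : Nat) (st : Int) (acc : List Int) (h : (acc.length : Int) < w) :
    csfA_loop ref rest w fuel st acc
      = acc ++ ((decRange st fuel).filter (okA ref rest)).take (w - acc.length).toNat := by
  induction fuel generalizing st acc with
  | zero => simp [csfA_loop, decRange]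
  | succ n ih =>
    by_cases hst : 0 ≤ st
    · rw [csfA_loop, if_pos ⟨hst, h⟩]
      have hacc' : (if ref.any (fun p => p.1 == st) then
            (if csfA_inner rest st then acc ++ [st] else acc) else acc)
          = if okA ref rest st then acc ++ [st] else acc := by
        unfold okA
        by_cases h1 : ref.any (fun p => p.1 == st) = true <;> simp [h1]
      rw [hacc']
      by_cases hok : okA ref rest st = true
      · rw [if_pos hok]
        simp only [decRange, if_pos hst, List.filter_cons, hok, if_pos]
        by_cases h2 : (((acc ++ [st]).length : Int)) < w
        · rw [ih _ _ h2]
          have hlen : ((acc ++ [st]).length : Int) = acc.length + 1 := by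
            simp
          have hk : (w - acc.length).toNat = (w - (acc ++ [st]).length).toNat + 1 := by
            rw [hlen] at h2 ⊢; omega
          rw [hk, List.take_succ_cons, List.append_assoc]
          rfl
        · rw [csfA_loop_stop _ _ _ _ _ _ h2]
          have hlen : ((acc ++ [st]).length : Int) = acc.length + 1 := by simp
          have hk : (w - acc.length).toNat = 1 := by rw [hlen] at h2; omega
          rw [hk, List.take_succ_cons, List.take_zero]
      · rw [if_neg hok, ih _ _ h]
        simp only [decRange, if_pos hst, List.filter_cons]
        rw [if_neg (by simp [hok])]
    · rw [csfA_loop, if_neg (by omega)]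
      simp [decRange, hst]

theorem mem_foldl_inter (rs : List (List (Int × Int))) (s : List Int) (x : Int) :
    x ∈ rs.foldl (fun c m => PySem.Set.inter c (m.map Prod.fst)) s
      ↔ x ∈ s ∧ ∀ m ∈ rs, x ∈ m.map Prod.fst := by
  induction rs generalizing s with
  | nil => simp
  | cons m rs ih =>
    simp only [List.foldl_cons, ih, PySem.Set.mem_inter, List.mem_cons]
    constructor
    · rintro ⟨⟨h1, h2⟩, h3⟩
      exact ⟨h1, by rintro m' (rfl | hm) <;> [exact h2; exact h3 m' hm]⟩
    · rintro ⟨h1, h2⟩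
      exact ⟨⟨h1, h2 m (Or.inl rfl)⟩, fun m' hm => h2 m' (Or.inr hm)⟩

theorem nodup_foldl_inter (rs : List (List (Int × Int))) (s : List Int) (hs : s.Nodup) :
    (rs.foldl (fun c m => PySem.Set.inter c (m.map Prod.fst)) s).Nodup := by
  induction rs generalizing s with
  | nil => exact hs
  | cons m rs ih => exact ih _ (PySem.Set.nodup_inter _ _ hs)

-- ===== VERDICT (by name: the statement is the Claim_ definition above) =====
theorem common_suffix_steps_fast_py_spec : Claim_equal_common_suffix_steps_fast_py := by
  intro prs cs w _dom
  unfold Spec_common_suffix_steps_fast_py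
  cases hmaps : prs.map Prod.snd with
  | nil => simp [common_suffix_steps_fast_py, common_suffix_steps_fast_py_alt, hmaps]
  | cons ref rest =>
    by_cases hg : w ≤ 0 ∨ cs < 0
    · simp [common_suffix_steps_fast_py, common_suffix_steps_fast_py_alt, hmaps, hg]
    · have hw : 0 < w := by omega
      have hcs : 0 ≤ cs := by omega
      simp only [common_suffix_steps_fast_py, common_suffix_steps_fast_py_alt, hmaps,
        if_neg hg]
      set cap : Int := max (w * 20) (w + 1) with hcap
      have hcapnat : ((cap.toNat : Int)) = cap := Int.toNat_of_nonneg (by omega)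
      set lo : Int := max 0 (cs - cap + 1) with hlo
      set F : List Int := (decRange cs cap.toNat).filter (okA ref rest) with hF
      have hwnat : ((w.toNat : Int)) = w := Int.toNat_of_nonneg (by omega)
      -- A's loop result
      rw [csfA_loop_eq _ _ _ _ _ _ (by simpa using hw)]
      simp only [List.length_nil, Int.natCast_zero, Int.sub_zero, List.nil_append, ← hF]
      -- the scanned window is exactly [lo, cs]
      have hwin : ∀ x : Int, (0 ≤ x ∧ cs - (cap.toNat : Int) < x ∧ x ≤ cs) ↔ (lo ≤ x ∧ x ≤ cs) := by
        intro x; rw [hlo]; omega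
      -- candidates = F.reverse
      have hdecnd : (decRange cs cap.toNat).Nodup :=
        (pairwise_gt_decRange cs cap.toNat).imp (fun hab => by omega)
      have hFnodup : F.Nodup := hdecnd.filter _
      have hFrev : PySem.List.sorted
          ((rest.foldl (fun c m => PySem.Set.inter c (m.map Prod.fst))
              (PySem.Set.ofList (ref.map Prod.fst))).filter
            (fun s => decide (lo ≤ s) && decide (s ≤ cs)))
          (fun x => x) false = F.reverse := by
        apply PySem.List.sorted_eq_of_perm_of_pairwise_lt
        · apply (List.perm_ext_iff_of_nodup (by simpa using hFnodup) ?_).mpr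
          · intro x
            simp only [List.mem_reverse, hF, List.mem_filter, mem_decRange,
              mem_foldl_inter, PySem.Set.mem_ofList, okA, csfA_inner_eq_all,
              Bool.and_eq_true, List.all_eq_true, List.any_eq_true, beq_iff_eq,
              List.mem_map, decide_eq_true_eq, hwin x]
            constructor
            · rintro ⟨hrange, ⟨p, hp, hpx⟩, hall⟩
              exact ⟨⟨⟨p, hp, hpx⟩, fun m hm => by
                obtain ⟨q, hq, hqx⟩ := hall m hm
                exact ⟨q, hq, hqx⟩⟩, hrange⟩
            · rintro ⟨⟨⟨p, hp, hpx⟩, hall⟩, hrange⟩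
              exact ⟨hrange, ⟨p, hp, hpx⟩, fun m hm => by
                obtain ⟨q, hq, hqx⟩ := hall m hm
                exact ⟨q, hq, hqx⟩⟩
          · exact List.Nodup.filter _
              (nodup_foldl_inter rest _ (PySem.Set.nodup_ofList _))
        · rw [List.pairwise_reverse]
          apply List.Pairwise.filter
          apply (pairwise_gt_decRange cs cap.toNat).imp
          intro a b hab
          exact hab
      rw [hFrev]
      -- both sides are the last w elements
      have hslice : PySem.List.slice F.reverse (some (-w)) none
          = F.reverse.drop (F.reverse.length - w.toNat) := by
        rw [← hwnat, PySem.List.slice_from_neg_natCast _ _ (by omega)]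
        congr 1
      rw [hslice, List.length_reverse, ← List.reverse_take]
      by_cases hE : F.take w.toNat = []
      · rw [if_pos hE, hE]
        rfl
      · rw [if_neg hE]
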